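-- pv_equiv track=rewrite | github.com/UEFBiomedicalInformaticsLab/BIODAI | MOOCAB/py/util/sequence_utils.py | clean_redundant_subsequences
-- ===== SOURCE A (Python) =====
-- from collections.abc import Iterable, Sized, Sequence
--
-- def clean_redundant_subsequences(data: Sequence[Sequence]) -> list[Sequence]:
--     """If a sequence has all elements contained in another sequence, it is removed."""
--     data_len = len(data)
--     sets = [set(d) for d in data]
--     to_keep = [True]*data_len
--     for i in range(data_len):
--         i_set = sets[i]
--         for j in range(data_len):
--             if i != j:
--                 j_set = sets[j]
--                 if i_set.issubset(j_set):
--                     if i < j: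
--                         to_keep[i] = False
--                     else:  # We do not want to remove both i and j sets if they are equal.
--                         if not j_set.issubset(i_set):
--                             to_keep[i] = False
--     res = []
--     for i in range(data_len):
--         if to_keep[i]:
--             res.append(data[i])
--     return res
-- ===== SOURCE B (Python) =====
-- def clean_redundant_subsequences(data):
--     """If a sequence has all elements contained in another sequence, it is removed.
--
--     Two-phase: dedup by element-set keeping the last index per equal set,
--     then drop representatives whose set is a strict subset of another's.
--     """
--     reps = {}
--     for i in range(len(data)):
--         reps[frozenset(data[i])] = i
--     keep = []
--     for s, i in reps.items():
--         if not any(s < t for t in reps):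
--             keep.append(i)
--     return [data[i] for i in sorted(keep)]
-- ===== Notes on version B (the rewrite author's own statement) =====
-- stated objective: alternative
-- what changed: Replaces A's interleaved double loop with per-pair tie-break logic by a two-phase decomposition: first a dict from frozenset(element-set) to its last original index (deduplicating equal sets and absorbing the keep-last tie-break), then a strict-subset filter over the distinct representatives only, output rebuilt in ascending index order.
import Mathlib
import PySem

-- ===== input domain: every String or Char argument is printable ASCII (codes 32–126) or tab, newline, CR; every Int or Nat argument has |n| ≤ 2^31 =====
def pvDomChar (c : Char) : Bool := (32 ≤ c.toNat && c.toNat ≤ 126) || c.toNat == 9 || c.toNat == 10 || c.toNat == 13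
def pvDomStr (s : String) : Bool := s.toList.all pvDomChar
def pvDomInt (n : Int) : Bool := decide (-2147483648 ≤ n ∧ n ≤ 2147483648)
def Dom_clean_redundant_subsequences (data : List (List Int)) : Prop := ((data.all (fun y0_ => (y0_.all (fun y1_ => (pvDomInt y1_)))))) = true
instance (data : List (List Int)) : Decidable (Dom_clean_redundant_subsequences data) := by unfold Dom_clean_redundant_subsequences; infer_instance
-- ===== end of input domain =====

-- B replaces A's interleaved O(n^2) marking loop by a two-phase decomposition: dedup by
-- element-set (keep-last index, absorbing the equal-set tie-break), then drop
-- representatives whose set is a strict subset of another representative's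
-- (objective: alternative decomposition; same result, proved below).

-- ===== PORT A =====
def clean_redundant_subsequences (data : List (List Int)) : List (List Int) :=
  let data_len := data.length
  let sets := data.map (fun d => PySem.Set.ofList d)
  let to_keep := List.replicate data_len true
  let to_keep := (List.range data_len).foldl (fun to_keep i =>
    let i_set := sets.getD i []
    (List.range data_len).foldl (fun to_keep j =>
      if i ≠ j then
        let j_set := sets.getD j []
        if PySem.Set.issubset i_set j_set then
          if i < j then to_keep.set i false
          else
            if ! PySem.Set.issubset j_set i_set then to_keep.set i false else to_keep
        else to_keep
      else to_keep) to_keep) to_keep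
  (List.range data_len).foldl (fun res i => if to_keep.getD i true then res ++ [data.getD i []] else res) []

-- ===== PORT B =====
-- frozenset(d) used as a dict key compares by set equality; it is modelled exactly
-- (for lookup, equality and subset tests) by the canonical sorted duplicate-free list.
def pvFrozen (d : List Int) : List Int := PySem.List.sorted (PySem.Set.ofList d) (fun x => x)

def clean_redundant_subsequences_alt (data : List (List Int)) : List (List Int) :=
  let reps : PySem.Dict (List Int) Nat :=
    (List.range data.length).foldl (fun reps i => reps.insert (pvFrozen (data.getD i [])) i) PySem.Dict.empty
  let keep : List Nat := reps.items.foldl (fun keep si =>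
    if ! (reps.keys.any (fun t => PySem.Set.issubset si.1 t && ! PySem.Set.equal si.1 t)) then keep ++ [si.2]
    else keep) []
  (PySem.List.sorted keep (fun x => x)).map (fun i => data.getD i [])

-- ===== PRECONDITION & SPEC =====
def Spec_clean_redundant_subsequences (data : List (List Int)) (out : List (List Int)) : Prop := out = clean_redundant_subsequences_alt data
instance (data : List (List Int)) (out : List (List Int)) : Decidable (Spec_clean_redundant_subsequences data out) := by unfold Spec_clean_redundant_subsequences; infer_instance

-- ===== CLAIM (what is proved, stated in full; the proofs are below) =====
def Claim_equal_clean_redundant_subsequences : Prop := ∀ (data : List (List Int)), Dom_clean_redundant_subsequences data → Spec_clean_redundant_subsequences data (clean_redundant_subsequences data)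

-- ===== LEMMAS AND PROOFS =====

-- subset test between the element sets of two raw lists
def pvSubL (a b : List Int) : Bool := PySem.Set.issubset (PySem.Set.ofList a) (PySem.Set.ofList b)

-- the condition under which A s inner loop clears index i, at inner index j
def pvCond (data : List (List Int)) (i j : Nat) : Bool :=
  !(i == j) && (pvSubL (data.getD i []) (data.getD j []) &&
    (decide (i < j) || ! pvSubL (data.getD j []) (data.getD i [])))

-- A keeps index i iff no j triggers pvCond
def pvKeep (data : List (List Int)) (i : Nat) : Bool :=
  ! ((List.range data.length).any (fun j => pvCond data i j))

lemma pvSubL_iff (a b : List Int) : pvSubL a b = true ↔ ∀ x ∈ a, x ∈ b := by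
  simp [pvSubL, PySem.Set.issubset, List.all_eq_true, PySem.Set.mem_ofList, PySem.Set.contains]

lemma mem_pvFrozen (a : List Int) (x : Int) : x ∈ pvFrozen a ↔ x ∈ a := by
  simp [pvFrozen, PySem.List.mem_sorted, PySem.Set.mem_ofList]

lemma pvFrozen_inj {a b : List Int} (h : ∀ x, x ∈ a ↔ x ∈ b) : pvFrozen a = pvFrozen b := by
  have pa := PySem.List.sorted_ofList_pairwise_lt (κ := Int) a
  have pb := PySem.List.sorted_ofList_pairwise_lt (κ := Int) b
  rw [show (PySem.List.sorted (PySem.Set.ofList a) fun x => x) = pvFrozen a from rfl] at pa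
  rw [show (PySem.List.sorted (PySem.Set.ofList b) fun x => x) = pvFrozen b from rfl] at pb
  have hperm : (pvFrozen a).Perm (pvFrozen b) := by
    rw [List.perm_ext_iff_of_nodup pa.nodup pb.nodup]
    intro x; rw [mem_pvFrozen, mem_pvFrozen, h]
  exact List.Perm.eq_of_pairwise (fun x y _ _ hxy hyx => le_antisymm hxy hyx)
    (pa.imp le_of_lt) (pb.imp le_of_lt) hperm

lemma issub_pvFrozen (a b : List Int) :
    PySem.Set.issubset (pvFrozen a) (pvFrozen b) = pvSubL a b := by
  rw [Bool.eq_iff_iff, pvSubL_iff]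
  simp only [PySem.Set.issubset, List.all_eq_true, PySem.Set.contains, List.contains_iff_mem,
    mem_pvFrozen]

lemma equal_pvFrozen (a b : List Int) :
    PySem.Set.equal (pvFrozen a) (pvFrozen b) = (pvSubL a b && pvSubL b a) := by
  show (PySem.Set.issubset _ _ && PySem.Set.issubset _ _) = _
  rw [issub_pvFrozen, issub_pvFrozen]

lemma getD_sets (data : List (List Int)) (j : Nat) (hj : j < data.length) :
    (data.map (fun d => PySem.Set.ofList d)).getD j [] = PySem.Set.ofList (data.getD j []) := by
  rw [List.getD_eq_getElem?_getD, List.getD_eq_getElem?_getD, List.getElem?_map,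
    List.getElem?_eq_getElem hj]
  rfl

lemma foldl_set_if {i : Nat} (c : Nat → Bool) (l : List Nat) (tk : List Bool) :
    l.foldl (fun tk j => if c j then tk.set i false else tk) tk
      = if l.any c then tk.set i false else tk := by
  induction l generalizing tk with
  | nil => simp
  | cons j rest ih =>
      by_cases hj : c j = true
      · simp [hj, ih, List.set_set]
      · simp [hj, ih]

lemma inner_eq (data : List (List Int)) (i : Nat) (hi : i < data.length) (tk : List Bool) :
    (List.range data.length).foldl (fun to_keep j =>
      if i ≠ j then
        if PySem.Set.issubset ((data.map (fun d => PySem.Set.ofList d)).getD i [])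
            ((data.map (fun d => PySem.Set.ofList d)).getD j []) then
          if i < j then to_keep.set i false
          else
            if ! PySem.Set.issubset ((data.map (fun d => PySem.Set.ofList d)).getD j [])
                ((data.map (fun d => PySem.Set.ofList d)).getD i []) then to_keep.set i false
            else to_keep
        else to_keep
      else to_keep) tk
    = if (List.range data.length).any (fun j => pvCond data i j) then tk.set i false else tk := by
  rw [PySem.List.foldl_congr_mem _ _ (fun tk j => if pvCond data i j then tk.set i false else tk) tk ?_]
  · exact foldl_set_if _ _ _
  · intro tk j hj
    rw [List.mem_range] at hj
    rw [getD_sets data i hi, getD_sets data j hj]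
    simp only [pvCond, pvSubL, Bool.and_eq_true, Bool.or_eq_true, ne_eq,
      decide_eq_true_eq, Bool.not_eq_true', Bool.eq_false_iff, beq_iff_eq]
    split_ifs <;> first | rfl | (exfalso; tauto)

lemma outer_inv (data : List (List Int)) (k : Nat) (hk : k ≤ data.length) :
    (List.range k).foldl (fun to_keep i =>
      (List.range data.length).foldl (fun to_keep j =>
        if i ≠ j then
          if PySem.Set.issubset ((data.map (fun d => PySem.Set.ofList d)).getD i [])
              ((data.map (fun d => PySem.Set.ofList d)).getD j []) then
            if i < j then to_keep.set i false
            else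
              if ! PySem.Set.issubset ((data.map (fun d => PySem.Set.ofList d)).getD j [])
                  ((data.map (fun d => PySem.Set.ofList d)).getD i []) then to_keep.set i false
              else to_keep
          else to_keep
        else to_keep) to_keep) (List.replicate data.length true)
    = (List.range data.length).map (fun i => if i < k then pvKeep data i else true) := by
  induction k with
  | zero =>
      simp only [List.range_zero, List.foldl_nil]
      rw [show (fun i => if i < 0 then pvKeep data i else true) = (fun (_ : Nat) => true) by
        funext i; simp]
      rw [List.map_const', List.length_range]
  | succ k ih =>
      have hk' : k ≤ data.length := Nat.le_of_succ_le hk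
      have hkn : k < data.length := hk
      rw [List.range_succ, List.foldl_append, ih hk', List.foldl_cons, List.foldl_nil,
        inner_eq data k hkn]
      by_cases ha : (List.range data.length).any (fun j => pvCond data k j) = true
      · rw [if_pos ha]
        apply List.ext_getElem
        · simp
        · intro m h1 h2
          simp only [List.getElem_set, List.getElem_map, List.getElem_range] at *
          have hm : m < data.length := by simpa using h2
          by_cases hmk : k = m
          · subst hmk
            simp [pvKeep, ha]
          · by_cases hmlt : m < k
            · simp [hmk, hmlt, Nat.lt_succ_of_lt hmlt]
            · have : ¬ m < k + 1 := by omega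
              simp [hmk, hmlt, this]
      · rw [if_neg ha]
        apply List.ext_getElem
        · simp
        · intro m h1 h2
          simp only [List.getElem_map, List.getElem_range]
          by_cases hmk : m = k
          · subst hmk
            have hku : pvKeep data m = true := by
              simp [pvKeep, Bool.eq_false_iff.mpr ha]
            simp [hku]
          · by_cases hmlt : m < k
            · simp [hmlt, Nat.lt_succ_of_lt hmlt]
            · have h1' : ¬ m < k := hmlt
              have h2' : ¬ m < k + 1 := by omega
              simp [h1', h2']
lemma A_eq (data : List (List Int)) :
    clean_redundant_subsequences data
      = ((List.range data.length).filter (fun i => pvKeep data i)).map (fun i => data.getD i []) := by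
  show (List.range data.length).foldl _ [] = _
  rw [outer_inv data data.length le_rfl]
  rw [PySem.List.foldl_append_if (fun i => ((List.range data.length).map
      (fun i => if i < data.length then pvKeep data i else true)).getD i true) (fun i => data.getD i []) _ []]
  rw [List.nil_append]
  congr 1
  apply List.filter_congr
  intro i hi
  rw [List.mem_range] at hi
  rw [PySem.List.getD_map_range]
  · simp [hi]
  · exact hi

lemma get?_foldl_insert_idx {κ : Type} [BEq κ] [LawfulBEq κ] (key : Nat → κ) (l : List Nat)
    (d : PySem.Dict κ Nat) (k : κ) :
    ((l.foldl (fun d i => d.insert (key i) i) d).get? k)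
      = ((l.filter (fun i => key i == k)).getLast?).or (d.get? k) := by
  induction l using List.reverseRecOn with
  | nil => simp
  | append_singleton xs x ih =>
      rw [List.foldl_append, List.foldl_cons, List.foldl_nil, List.filter_append]
      by_cases hx : (key x == k) = true
      · have hxk : key x = k := by simpa using hx
        rw [List.filter_cons, if_pos hx, List.filter_nil, List.getLast?_concat, hxk,
          PySem.Dict.get?_insert_self]
        simp
      · have hne : k ≠ key x := fun h => hx (by simp [h.symm])
        rw [List.filter_cons, if_neg hx, List.filter_nil, List.append_nil,
          PySem.Dict.get?_insert_of_ne _ _ hne, ih]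

lemma getLast?_filter_range (n : Nat) (p : Nat → Bool) (i : Nat) :
    ((List.range n).filter p).getLast? = some i
      ↔ (i < n ∧ p i = true ∧ ∀ j, i < j → j < n → p j = false) := by
  induction n with
  | zero => simp
  | succ n ih =>
      rw [List.range_succ, List.filter_append, List.filter_cons, List.filter_nil]
      by_cases hp : p n = true
      · rw [if_pos hp, List.getLast?_concat]
        constructor
        · rintro h
          have : n = i := by simpa using h
          subst this
          exact ⟨Nat.lt_succ_self n, hp, fun j h1 h2 => by omega⟩
        · rintro ⟨h1, h2, h3⟩
          by_cases hin : i = n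
          · subst hin; rfl
          · exfalso
            have : i < n := by omega
            have := h3 n this (Nat.lt_succ_self n)
            simp [hp] at this
      · rw [if_neg hp, List.append_nil, ih]
        constructor
        · rintro ⟨h1, h2, h3⟩
          refine ⟨by omega, h2, fun j hj1 hj2 => ?_⟩
          by_cases hjn : j = n
          · subst hjn; exact Bool.eq_false_iff.mpr hp
          · exact h3 j hj1 (by omega)
        · rintro ⟨h1, h2, h3⟩
          have hin : i ≠ n := fun h => by subst h; exact hp h2
          exact ⟨by omega, h2, fun j hj1 hj2 => h3 j hj1 (by omega)⟩

def pvKey (data : List (List Int)) (i : Nat) : List Int := pvFrozen (data.getD i [])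

def pvRepsD (data : List (List Int)) : PySem.Dict (List Int) Nat :=
  (List.range data.length).foldl (fun d i => d.insert (pvKey data i) i) PySem.Dict.empty

def pvKK (data : List (List Int)) : List (List Int) := (pvRepsD data).keys

def pvGood (data : List (List Int)) (k : List Int) : Bool :=
  ! ((pvKK data).any (fun t => PySem.Set.issubset k t && ! PySem.Set.equal k t))

def pvKeepList (data : List (List Int)) : List Nat :=
  ((pvKK data).filter (pvGood data)).map (fun k => (pvRepsD data).getD k 0)

lemma pvKK_nodup (data : List (List Int)) : (pvKK data).Nodup := by
  apply PySem.Dict.nodup_keys_foldl_insert_key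
  rw [PySem.Dict.keys_empty]
  exact List.nodup_nil

lemma mem_pvKK (data : List (List Int)) (k : List Int) :
    k ∈ pvKK data ↔ ∃ i, i < data.length ∧ pvKey data i = k := by
  unfold pvKK pvRepsD
  rw [PySem.Dict.keys_foldl_insert_key _ (fun i => pvKey data i) (fun _ i => i) _, PySem.Dict.keys_empty]
  show k ∈ PySem.Set.update [] _ ↔ _
  rw [show PySem.Set.update ([] : PySem.Set (List Int)) ((List.range data.length).map (fun i => pvKey data i))
       = PySem.Set.ofList ((List.range data.length).map (fun i => pvKey data i)) from rfl]
  rw [PySem.Set.mem_ofList]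
  simp [List.mem_map, List.mem_range]

lemma pvReps_get? (data : List (List Int)) (k : List Int) (i : Nat) :
    (pvRepsD data).get? k = some i
      ↔ (i < data.length ∧ pvKey data i = k ∧ ∀ j, i < j → j < data.length → pvKey data j ≠ k) := by
  unfold pvRepsD
  rw [get?_foldl_insert_idx, PySem.Dict.get?_empty, Option.or_none]
  rw [getLast?_filter_range]
  constructor
  · rintro ⟨h1, h2, h3⟩
    exact ⟨h1, by simpa using h2, fun j hj1 hj2 => by simpa using h3 j hj1 hj2⟩
  · rintro ⟨h1, h2, h3⟩
    exact ⟨h1, by simpa using h2, fun j hj1 hj2 => by simpa using h3 j hj1 hj2⟩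

lemma pvReps_getD (data : List (List Int)) (k : List Int) (hk : k ∈ pvKK data) :
    (pvRepsD data).get? k = some ((pvRepsD data).getD k 0) := by
  rw [mem_pvKK] at hk
  obtain ⟨i0, hi0, hk0⟩ := hk
  -- get? k is some: the filter is nonempty
  cases hg : (pvRepsD data).get? k with
  | some m => show _ = some _; rw [PySem.Dict.getD, hg]; rfl
  | none =>
      exfalso
      unfold pvRepsD at hg
      rw [get?_foldl_insert_idx, PySem.Dict.get?_empty, Option.or_none] at hg
      rw [List.getLast?_eq_none_iff] at hg
      have : i0 ∈ (List.range data.length).filter (fun i => pvKey data i == k) := by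
        rw [List.mem_filter, List.mem_range]
        exact ⟨hi0, by simp [hk0]⟩
      rw [hg] at this
      exact List.not_mem_nil this

-- the semantic heart
lemma mem_pvKeepList (data : List (List Int)) (i : Nat) :
    i ∈ pvKeepList data ↔ (i < data.length ∧ pvKeep data i = true) := by
  have keyeq : ∀ a b : Nat, pvKey data a = pvKey data b ↔
      (pvSubL (data.getD a []) (data.getD b []) = true ∧ pvSubL (data.getD b []) (data.getD a []) = true) := by
    intro a b
    constructor
    · intro h
      constructor <;> (rw [pvSubL_iff]; intro x hx)
      · rw [← mem_pvFrozen]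
        show x ∈ pvKey data b
        rw [← h]
        exact (mem_pvFrozen _ x).mpr hx
      · rw [← mem_pvFrozen]
        show x ∈ pvKey data a
        rw [h]
        exact (mem_pvFrozen _ x).mpr hx
    · rintro ⟨h1, h2⟩
      apply pvFrozen_inj
      rw [pvSubL_iff] at h1 h2
      exact fun x => ⟨fun hx => h1 x hx, fun hx => h2 x hx⟩
  constructor
  · intro hmem
    unfold pvKeepList at hmem
    rw [List.mem_map] at hmem
    obtain ⟨k, hkf, hki⟩ := hmem
    rw [List.mem_filter] at hkf
    obtain ⟨hkk, hgood⟩ := hkf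
    have hget := pvReps_getD data k hkk
    rw [hki] at hget
    rw [pvReps_get? data k i] at hget
    obtain ⟨hin, hkey, hmax⟩ := hget
    refine ⟨hin, ?_⟩
    unfold pvKeep
    rw [Bool.not_eq_eq_eq_not, Bool.not_true, List.any_eq_false]
    intro j hj
    rw [List.mem_range] at hj
    intro hcond
    unfold pvCond at hcond
    simp only [Bool.and_eq_true, Bool.or_eq_true, Bool.not_eq_true',
      decide_eq_true_eq] at hcond
    obtain ⟨hij, hsub, hdisj⟩ := hcond
    by_cases hrev : pvSubL (data.getD j []) (data.getD i []) = true
    · -- equal sets, so pvKey j = k and i < j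
      have hlt : i < j := by
        rcases hdisj with h | h
        · exact h
        · rw [hrev] at h; cases h
      have : pvKey data j = k := by
        rw [← hkey]
        exact (keyeq j i).mpr ⟨hrev, hsub⟩
      exact hmax j hlt hj this
    · -- strict superset among keys
      have hkkj : pvKey data j ∈ pvKK data := (mem_pvKK data _).mpr ⟨j, hj, rfl⟩
      unfold pvGood at hgood
      rw [Bool.not_eq_eq_eq_not, Bool.not_true, List.any_eq_false] at hgood
      have := hgood (pvKey data j) hkkj
      apply this
      rw [Bool.and_eq_true]
      constructor
      · rw [← hkey]
        show PySem.Set.issubset (pvKey data i) (pvKey data j) = true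
        unfold pvKey
        rw [issub_pvFrozen]
        exact hsub
      · rw [← hkey]
        show (! PySem.Set.equal (pvKey data i) (pvKey data j)) = true
        unfold pvKey
        rw [equal_pvFrozen, Bool.not_eq_eq_eq_not, Bool.not_true, Bool.and_eq_false_iff]
        right
        exact Bool.eq_false_iff.mpr hrev
  · rintro ⟨hin, hkeep⟩
    unfold pvKeepList
    rw [List.mem_map]
    refine ⟨pvKey data i, ?_, ?_⟩
    · rw [List.mem_filter]
      have hkk : pvKey data i ∈ pvKK data := (mem_pvKK data _).mpr ⟨i, hin, rfl⟩
      refine ⟨hkk, ?_⟩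
      unfold pvGood
      rw [Bool.not_eq_eq_eq_not, Bool.not_true, List.any_eq_false]
      intro t ht
      rw [mem_pvKK] at ht
      obtain ⟨j, hj, htj⟩ := ht
      intro hbad
      rw [← htj, Bool.and_eq_true] at hbad
      obtain ⟨hsub, hneq⟩ := hbad
      unfold pvKey at hsub hneq
      rw [issub_pvFrozen] at hsub
      rw [equal_pvFrozen] at hneq
      rw [Bool.not_eq_eq_eq_not, Bool.not_true, Bool.and_eq_false_iff] at hneq
      have hij : i ≠ j := by
        intro h
        subst h
        rcases hneq with h | h <;> rw [hsub] at h <;> cases h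
      -- pvCond i j holds, contradicting pvKeep
      unfold pvKeep at hkeep
      rw [Bool.not_eq_eq_eq_not, Bool.not_true, List.any_eq_false] at hkeep
      have := hkeep j (List.mem_range.mpr hj)
      apply this
      unfold pvCond
      simp only [Bool.and_eq_true, Bool.or_eq_true, decide_eq_true_eq,
        Bool.not_eq_true']
      refine ⟨by simpa using hij, hsub, ?_⟩
      rcases hneq with h | h
      · rw [hsub] at h; cases h
      · right; exact h
    · -- getD (pvKey i) 0 = i
      have hkk : pvKey data i ∈ pvKK data := (mem_pvKK data _).mpr ⟨i, hin, rfl⟩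
      have hget := pvReps_getD data _ hkk
      set m := (pvRepsD data).getD (pvKey data i) 0 with hm
      rw [pvReps_get? data _ m] at hget
      obtain ⟨hmn, hmkey, hmmax⟩ := hget
      by_cases him : i = m
      · exact him.symm
      · exfalso
        have hkeyeq := (keyeq m i).mp hmkey
        rcases Nat.lt_or_ge i m with hlt | hge
        · -- pvCond i m: i ≠ m, sub i m, i < m
          unfold pvKeep at hkeep
          rw [Bool.not_eq_eq_eq_not, Bool.not_true, List.any_eq_false] at hkeep
          have := hkeep m (List.mem_range.mpr hmn)
          apply this
          unfold pvCond
          simp only [Bool.and_eq_true, Bool.or_eq_true, decide_eq_true_eq,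
            Bool.not_eq_true']
          exact ⟨by simpa using him, hkeyeq.2, Or.inl hlt⟩
        · have hlt : m < i := by omega
          exact hmmax i hlt hin rfl

lemma B_unfold (data : List (List Int)) :
    clean_redundant_subsequences_alt data
      = (PySem.List.sorted (pvKeepList data) (fun x => x)).map (fun i => data.getD i []) := by
  have h : clean_redundant_subsequences_alt data
      = (PySem.List.sorted ((pvRepsD data).items.foldl (fun keep si =>
          if ! ((pvRepsD data).keys.any (fun t => PySem.Set.issubset si.1 t && ! PySem.Set.equal si.1 t))
          then keep ++ [si.2] else keep) []) (fun x => x)).map (fun i => data.getD i []) := rfl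
  rw [h]
  congr 1
  rw [PySem.List.foldl_append_if
    (fun (si : List Int × Nat) => ! ((pvRepsD data).keys.any (fun t => PySem.Set.issubset si.1 t && ! PySem.Set.equal si.1 t)))
    (fun (si : List Int × Nat) => si.2) _ []]
  rw [List.nil_append]
  rw [PySem.Dict.items_eq_map_keys (pvRepsD data) (pvKK_nodup data) 0]
  unfold pvKeepList
  rw [List.filter_map, List.map_map]
  rfl
lemma B_eq (data : List (List Int)) :
    clean_redundant_subsequences_alt data
      = ((List.range data.length).filter (fun i => pvKeep data i)).map (fun i => data.getD i []) := by
  rw [B_unfold]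
  congr 1
  apply PySem.List.sorted_eq_of_perm_of_pairwise_lt
  · -- perm
    rw [List.perm_ext_iff_of_nodup]
    · intro i
      rw [mem_pvKeepList, List.mem_filter, List.mem_range]
    · -- nodup of the filtered range
      exact (List.nodup_range).filter _
    · -- nodup of pvKeepList
      apply List.Nodup.map_on
      · intro k hk k' hk' heq
        rw [List.mem_filter] at hk hk'
        have h1 := pvReps_getD data k hk.1
        have h2 := pvReps_getD data k' hk'.1
        rw [heq] at h1
        rw [pvReps_get?] at h1 h2
        exact h1.2.1.symm.trans h2.2.1
      · exact (pvKK_nodup data).filter _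
  · -- pairwise <
    exact (List.pairwise_lt_range).filter _

-- ===== VERDICT (by name: the statement is the Claim_ definition above) =====
theorem clean_redundant_subsequences_spec : Claim_equal_clean_redundant_subsequences := by
  intro data _
  show _ = _
  rw [A_eq, B_eq]
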